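-- pv_equiv track=rewrite | github.com/ClarinCodes/fcc-daily-coding-challenges | Python/#247 | Last Letter.py | get_last_letter
-- ===== SOURCE A (Python) =====
-- def get_last_letter(s):
--     max_char = ''
--     result = ''
--
--     for c in s:
--         if c.isalpha() and c.lower() > max_char:
--             max_char = c.lower()
--             result = c
--
--     return result
-- ===== SOURCE B (Python) =====
-- def get_last_letter(s):
--     first_by_letter = {}
--     for c in s:
--         if c.isalpha():
--             first_by_letter.setdefault(c.lower(), c)
--     for letter in "zyxwvutsrqponmlkjihgfedcba":
--         if letter in first_by_letter:
--             return first_by_letter[letter]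
--     return ''
-- ===== Notes on version B (the rewrite author's own statement) =====
-- stated objective: alternative
-- what changed: Replaces the single running-max scan with a first-occurrence index (dict keyed by lowercase letter, built with setdefault) followed by a descending scan of the alphabet that returns the stored original-case char at the first letter present.
import Mathlib
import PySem

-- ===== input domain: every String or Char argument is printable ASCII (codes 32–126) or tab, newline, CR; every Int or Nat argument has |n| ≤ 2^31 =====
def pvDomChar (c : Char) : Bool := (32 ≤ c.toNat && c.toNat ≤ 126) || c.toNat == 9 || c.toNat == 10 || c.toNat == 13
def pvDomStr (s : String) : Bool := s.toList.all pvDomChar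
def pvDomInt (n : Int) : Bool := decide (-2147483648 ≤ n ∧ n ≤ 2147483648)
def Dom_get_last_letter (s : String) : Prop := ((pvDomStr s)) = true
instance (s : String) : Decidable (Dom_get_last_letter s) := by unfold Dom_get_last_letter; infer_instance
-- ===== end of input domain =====

-- B replaces A's running-max scan with a first-occurrence dict keyed by lowercase letter
-- plus a descending alphabet scan (alternative decomposition, same O(n) cost).


-- ===== PORT A =====
-- state = (max_char, result), both Python strings kept as their char lists;
-- Python's string '>' is '<' on the char lists (exact per PySem).
def get_last_letter (s : String) : String :=
  String.mk
    (s.toList.foldl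
      (fun (st : List Char × List Char) c =>
        if PySem.Chars.isalpha c && decide (st.1 < [PySem.Chars.lowerChar c]) then
          ([PySem.Chars.lowerChar c], [c])
        else st)
      ([], [])).2

-- ===== PORT B =====
-- second loop of Source B: walk the alphabet string descending, return d[letter] at the
-- first letter present ('letter in d' + 'd[letter]' merged into one get? match).
def pvScanB : List Char → PySem.Dict Char Char → String
  | [], _ => ""
  | l :: rest, d =>
    match d.get? l with
    | some v => String.mk [v]
    | none => pvScanB rest d

def get_last_letter_alt (s : String) : String :=
  pvScanB "zyxwvutsrqponmlkjihgfedcba".toList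
    (s.toList.foldl
      (fun d c =>
        if PySem.Chars.isalpha c then d.setdefault (PySem.Chars.lowerChar c) c else d)
      PySem.Dict.empty)

-- ===== PRECONDITION & SPEC =====
def Spec_get_last_letter (s : String) (out : String) : Prop := out = get_last_letter_alt s
instance (s : String) (out : String) : Decidable (Spec_get_last_letter s out) := by unfold Spec_get_last_letter; infer_instance

-- ===== CLAIM (what is proved, stated in full; the proofs are below) =====
def Claim_equal_get_last_letter : Prop := ∀ (s : String), Dom_get_last_letter s → Spec_get_last_letter s (get_last_letter s)

-- ===== LEMMAS AND PROOFS =====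

theorem pvChar_le_iff {a b : Char} : a ≤ b ↔ a.toNat ≤ b.toNat := by
  rw [Char.le_def, Char.toNat, Char.toNat, UInt32.le_iff_toNat_le]

theorem pvLower_bounds {c : Char} (h : PySem.Chars.isalpha c = true) :
    97 ≤ (PySem.Chars.lowerChar c).toNat ∧ (PySem.Chars.lowerChar c).toNat ≤ 122 := by
  unfold PySem.Chars.isalpha PySem.Chars.isupper PySem.Chars.islower at h
  unfold PySem.Chars.lowerChar PySem.Chars.isupper
  simp only [Bool.or_eq_true, Bool.and_eq_true, decide_eq_true_eq] at h
  rcases h with ⟨h1, h2⟩ | ⟨h1, h2⟩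
  · rw [pvChar_le_iff] at h1 h2
    have hle : ('A' : Char).toNat = 65 := rfl
    have hZe : ('Z' : Char).toNat = 90 := rfl
    rw [hle] at h1; rw [hZe] at h2
    have hv : (Char.ofNat (c.toNat + 32)).toNat = c.toNat + 32 := by
      rw [Char.toNat_ofNat]
      have : (c.toNat + 32).isValidChar := by simp [Nat.isValidChar]; omega
      simp [this]
    simp only [pvChar_le_iff, hle, hZe, h1, h2, decide_true, Bool.and_self, if_pos, hv]
    constructor <;> omega
  · rw [pvChar_le_iff] at h1 h2
    have hae : ('a' : Char).toNat = 97 := rfl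
    have hze : ('z' : Char).toNat = 122 := rfl
    rw [hae] at h1; rw [hze] at h2
    have hup : ¬ (decide ('A' ≤ c) && decide (c ≤ 'Z')) = true := by
      simp only [Bool.and_eq_true, decide_eq_true_eq, pvChar_le_iff, not_and]
      intro _
      show ¬ c.toNat ≤ ('Z' : Char).toNat
      have : ('Z' : Char).toNat = 90 := rfl
      omega
    rw [if_neg hup]
    omega

theorem pvMemAlpha {k : Char} (h1 : 97 ≤ k.toNat) (h2 : k.toNat ≤ 122) :
    k ∈ "zyxwvutsrqponmlkjihgfedcba".toList := by
  have e : "zyxwvutsrqponmlkjihgfedcba".toList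
      = (List.range 26).map (fun i => Char.ofNat (122 - i)) := by decide
  rw [e]
  refine List.mem_map.mpr ⟨122 - k.toNat, List.mem_range.mpr (by omega), ?_⟩
  have h : 122 - (122 - k.toNat) = k.toNat := by omega
  simp only [h, Char.ofNat_toNat]

-- the invariant tying A's running state to B's dict
def pvInv (st : List Char × List Char) (d : PySem.Dict Char Char) : Prop :=
  (st = ([], []) ∧ ∀ k, d.get? k = none)
  ∨ ∃ k v, st = ([k], [v]) ∧ d.get? k = some v ∧ 97 ≤ k.toNat ∧ k.toNat ≤ 122 ∧
      ∀ k', d.contains k' = true → k' ≤ k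

theorem pvInv_step (st : List Char × List Char) (d : PySem.Dict Char Char) (c : Char)
    (h : pvInv st d) :
    pvInv
      (if PySem.Chars.isalpha c && decide (st.1 < [PySem.Chars.lowerChar c]) then
          ([PySem.Chars.lowerChar c], [c]) else st)
      (if PySem.Chars.isalpha c then d.setdefault (PySem.Chars.lowerChar c) c else d) := by
  by_cases ha : PySem.Chars.isalpha c = true
  · have hb := pvLower_bounds ha
    set lc := PySem.Chars.lowerChar c with hlc
    rcases h with ⟨hst, hd⟩ | ⟨k, v, hst, hget, hk1, hk2, hmax⟩
    · -- empty state: A takes the branch ([] < [lc]), B inserts a fresh key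
      have hlt : (([], []) : List Char × List Char).1 < [lc] := List.nil_lt_cons lc []
      have hnc : d.contains lc = false := by
        rw [PySem.Dict.contains_eq_isSome_get?, hd]; rfl
      rw [hst]
      simp only [ha, Bool.true_and, decide_eq_true_eq, if_pos hlt, if_true]
      rw [PySem.Dict.setdefault_of_not_contains _ _ hnc]
      refine Or.inr ⟨lc, c, rfl, PySem.Dict.get?_insert_self _ _ _, hb.1, hb.2, ?_⟩
      intro k' hk'
      rw [PySem.Dict.contains_insert] at hk'
      simp only [Bool.or_eq_true, beq_iff_eq] at hk'
      rcases hk' with h | h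
      · exact le_of_eq h
      · rw [PySem.Dict.contains_eq_isSome_get?, hd k'] at h; cases h
    · rw [hst]
      by_cases hlt : k < lc
      · -- new maximum: A updates, B inserts a fresh key
        have hlt' : (([k], [v]) : List Char × List Char).1 < [lc] := by
          simpa [List.cons_lt_cons_iff] using hlt
        have hnc : d.contains lc = false := by
          by_contra hcon
          exact absurd (hmax lc (by simpa using hcon)) (not_le.mpr hlt)
        simp only [ha, Bool.true_and, decide_eq_true_eq, if_pos hlt', if_true]
        rw [PySem.Dict.setdefault_of_not_contains _ _ hnc]
        refine Or.inr ⟨lc, c, rfl, PySem.Dict.get?_insert_self _ _ _, hb.1, hb.2, ?_⟩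
        intro k' hk'
        rw [PySem.Dict.contains_insert] at hk'
        simp only [Bool.or_eq_true, beq_iff_eq] at hk'
        rcases hk' with h | h
        · exact le_of_eq h
        · exact le_of_lt (lt_of_le_of_lt (hmax k' h) hlt)
      · -- not larger: A keeps its state; B's setdefault never shadows key k
        have hlt' : ¬ (([k], [v]) : List Char × List Char).1 < [lc] := by
          simpa [List.cons_lt_cons_iff] using hlt
        simp only [ha, Bool.true_and, decide_eq_true_eq, if_neg hlt', if_true]
        by_cases hc : d.contains lc = true
        · rw [PySem.Dict.setdefault_of_contains _ _ hc]
          exact Or.inr ⟨k, v, rfl, hget, hk1, hk2, hmax⟩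
        · have hnc : d.contains lc = false := by simpa using hc
          rw [PySem.Dict.setdefault_of_not_contains _ _ hnc]
          have hne : k ≠ lc := by
            intro he
            rw [PySem.Dict.contains_eq_isSome_get?, ← he, hget] at hnc
            simp at hnc
          refine Or.inr ⟨k, v, rfl, ?_, hk1, hk2, ?_⟩
          · rw [PySem.Dict.get?_insert_of_ne _ _ hne]; exact hget
          · intro k' hk'
            rw [PySem.Dict.contains_insert] at hk'
            simp only [Bool.or_eq_true, beq_iff_eq] at hk'
            rcases hk' with hk' | hk'
            · exact hk' ▸ le_of_not_gt hlt
            · exact hmax k' hk'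
  · -- non-letter: both sides unchanged
    simp only [Bool.not_eq_true] at ha
    simp only [ha, Bool.false_and, if_neg, Bool.false_eq_true, not_false_eq_true]
    exact h

theorem pvInv_fold (l : List Char) :
    ∀ st d, pvInv st d →
      pvInv
        (l.foldl (fun (st : List Char × List Char) c =>
          if PySem.Chars.isalpha c && decide (st.1 < [PySem.Chars.lowerChar c]) then
            ([PySem.Chars.lowerChar c], [c]) else st) st)
        (l.foldl (fun d c =>
          if PySem.Chars.isalpha c then d.setdefault (PySem.Chars.lowerChar c) c else d) d) := by
  induction l with
  | nil => intro st d h; exact h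
  | cons c t ih => intro st d h; exact ih _ _ (pvInv_step st d c h)

theorem pvScanB_none (L : List Char) (d : PySem.Dict Char Char)
    (h : ∀ k, d.get? k = none) : pvScanB L d = "" := by
  induction L with
  | nil => rfl
  | cons l rest ih => simp only [pvScanB, h l]; exact ih

theorem pvScanB_hit (k v : Char) (d : PySem.Dict Char Char)
    (hget : d.get? k = some v) (hmax : ∀ k', d.contains k' = true → k' ≤ k) :
    ∀ L : List Char, L.Pairwise (fun a b => b < a) → k ∈ L →
      pvScanB L d = String.mk [v] := by
  intro L
  induction L with
  | nil => intro _ hm; cases hm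
  | cons l rest ih =>
    intro hpw hm
    rcases List.pairwise_cons.mp hpw with ⟨hfirst, hrest⟩
    by_cases he : l = k
    · subst he
      simp only [pvScanB, hget]
    · have hmem : k ∈ rest := by
        rcases List.mem_cons.mp hm with he' | hmem
        · exact absurd he'.symm he
        · exact hmem
      have hlgt : k < l := hfirst k hmem
      have hnone : d.get? l = none := by
        cases hl : d.get? l with
        | none => rfl
        | some w =>
          have : l ≤ k := hmax l (by rw [PySem.Dict.contains_eq_isSome_get?, hl]; rfl)
          exact absurd this (not_le.mpr hlgt)
      simp only [pvScanB, hnone]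
      exact ih hrest hmem

-- ===== VERDICT (by name: the statement is the Claim_ definition above) =====
theorem get_last_letter_spec : Claim_equal_get_last_letter := by
  intro s _
  unfold Spec_get_last_letter get_last_letter get_last_letter_alt
  have h := pvInv_fold s.toList ([], []) PySem.Dict.empty
    (Or.inl ⟨rfl, fun k => PySem.Dict.get?_empty k⟩)
  rcases h with ⟨hst, hd⟩ | ⟨k, v, hst, hget, hk1, hk2, hmax⟩
  · rw [hst, pvScanB_none _ _ hd]; rfl
  · rw [hst, pvScanB_hit k v _ hget hmax _ (by decide) (pvMemAlpha hk1 hk2)]
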